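-- pv_equiv track=rewrite | github.com/katieT92/Karatsuba | main.py | solveListPlaceCalculations
-- ===== SOURCE A (Python) =====
-- task1 = "simplify term2"    # arg to solveListPlaceCalculations(task): simplify 2nd term
--
-- def solveListPlaceCalculations(list1,list2,list3,task):
--   resolvedList = []
--   listPairLen = [(list1,len(list1)), (list2,len(list2)), (list3,len(list3))]
--   rangeLen = max([listPairLen[0][1], listPairLen[1][1], listPairLen[2][1]])
--
--   for i in range(rangeLen):
--     total = 0
--     for pair in range(len(listPairLen)):
--       list = listPairLen[pair][0]
--       listLen = listPairLen[pair][1]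
--       if listLen <= rangeLen and listLen > i:
--         if task == task1:
--           if pair == 1:
--             total += list[listLen-1-i]
--           else:
--             total -= list[listLen-1-i]
--         else:
--           total += list[listLen-1-i]
--     resolvedList.insert(0,total)
--   return resolvedList
-- ===== SOURCE B (Python) =====
-- def solveListPlaceCalculations(list1, list2, list3, task):
--     n = max(len(list1), len(list2), len(list3))
--     result = [0] * n
--     s = -1 if task == "simplify term2" else 1
--     for lst, sign in ((list1, s), (list2, 1), (list3, s)):
--         off = n - len(lst)
--         for j, v in enumerate(lst):
--             result[off + j] += sign * v
--     return result
-- ===== Notes on version B (the rewrite author's own statement) =====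
-- stated objective: faster
-- what changed: A combines place by place from the right with bounds tests and insert(0,...) (quadratic front insertion); B preallocates a zero result of the common length and does one forward scatter-accumulate pass per list at its left offset (result[off+j] += sign*v), with the sign decided once.
import Mathlib
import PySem

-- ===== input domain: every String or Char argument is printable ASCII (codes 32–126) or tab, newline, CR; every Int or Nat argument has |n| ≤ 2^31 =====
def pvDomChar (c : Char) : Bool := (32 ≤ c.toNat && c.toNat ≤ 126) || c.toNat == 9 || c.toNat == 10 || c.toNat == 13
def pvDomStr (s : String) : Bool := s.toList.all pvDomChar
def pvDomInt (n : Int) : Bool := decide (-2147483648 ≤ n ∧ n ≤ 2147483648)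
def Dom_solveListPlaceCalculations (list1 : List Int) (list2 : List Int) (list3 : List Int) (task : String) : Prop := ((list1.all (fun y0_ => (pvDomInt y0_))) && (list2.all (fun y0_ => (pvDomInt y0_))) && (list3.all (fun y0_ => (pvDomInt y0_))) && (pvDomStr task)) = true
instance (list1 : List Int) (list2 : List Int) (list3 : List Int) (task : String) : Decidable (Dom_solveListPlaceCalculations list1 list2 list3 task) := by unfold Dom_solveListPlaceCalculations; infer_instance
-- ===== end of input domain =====

-- B replaces A's per-place right-to-left combine (with insert(0,...)) by a preallocated zero
-- result and one forward scatter-accumulate pass per list at its left offset (measured faster).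

-- ===== PORT A =====
-- Literal transliteration of A: indexed loops, right-to-left element access, insert(0, total).
-- List indexing uses pyGetD with an arbitrary default; every index is in range on every input
-- (pair ∈ {0,1,2} into a 3-element list; listLen-1-i with 0 ≤ i < listLen), so A is total and no Pre_ is needed.
def solveListPlaceCalculations (list1 : List Int) (list2 : List Int) (list3 : List Int) (task : String) : List Int :=
  let listPairLen : List (List Int × Int) :=
    [(list1, (list1.length : Int)), (list2, (list2.length : Int)), (list3, (list3.length : Int))]
  let rangeLen : Int :=
    (PySem.List.max? [(PySem.List.pyGetD listPairLen 0 ([], 0)).2,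
                      (PySem.List.pyGetD listPairLen 1 ([], 0)).2,
                      (PySem.List.pyGetD listPairLen 2 ([], 0)).2] (fun x => x)).getD 0
  (PySem.List.pyRange 0 rangeLen 1).foldl (fun resolvedList i =>
    let total : Int :=
      (PySem.List.pyRange 0 (listPairLen.length : Int) 1).foldl (fun total pair =>
        let lst := (PySem.List.pyGetD listPairLen pair ([], 0)).1
        let listLen := (PySem.List.pyGetD listPairLen pair ([], 0)).2
        if listLen ≤ rangeLen ∧ listLen > i then
          if task = "simplify term2" then
            if pair = 1 then total + PySem.List.pyGetD lst (listLen - 1 - i) 0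
            else total - PySem.List.pyGetD lst (listLen - 1 - i) 0
          else total + PySem.List.pyGetD lst (listLen - 1 - i) 0
        else total) 0
    PySem.List.insert resolvedList 0 total) []

-- ===== PORT B =====
-- Transliteration of Source B: result = [0]*n, then for each (lst, sign) a forward enumerate pass
-- doing result[off+j] += sign*v; reads/writes use pyGetD/pySetD (the index off+j is the Python index,
-- always ≥ 0 and < n here, so pySetD is exact).
def solveListPlaceCalculations_alt (list1 : List Int) (list2 : List Int) (list3 : List Int) (task : String) : List Int :=
  let n : Int := max (max (list1.length : Int) (list2.length : Int)) (list3.length : Int)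
  let result : List Int := List.replicate n.toNat 0
  let s : Int := if task = "simplify term2" then -1 else 1
  [(list1, s), (list2, (1 : Int)), (list3, s)].foldl (fun result p =>
    let lst := p.1
    let sign := p.2
    let off : Int := n - (lst.length : Int)
    (PySem.List.enumerate lst).foldl (fun r q =>
      PySem.List.pySetD r (off + q.1) (PySem.List.pyGetD r (off + q.1) 0 + sign * q.2)) result) result

-- ===== PRECONDITION & SPEC =====
def Spec_solveListPlaceCalculations (list1 : List Int) (list2 : List Int) (list3 : List Int) (task : String) (out : List Int) : Prop := out = solveListPlaceCalculations_alt list1 list2 list3 task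
instance (list1 : List Int) (list2 : List Int) (list3 : List Int) (task : String) (out : List Int) : Decidable (Spec_solveListPlaceCalculations list1 list2 list3 task out) := by unfold Spec_solveListPlaceCalculations; infer_instance

-- ===== CLAIM (what is proved, stated in full; the proofs are below) =====
def Claim_equal_solveListPlaceCalculations : Prop := ∀ (list1 : List Int) (list2 : List Int) (list3 : List Int) (task : String), Dom_solveListPlaceCalculations list1 list2 list3 task → Spec_solveListPlaceCalculations list1 list2 list3 task (solveListPlaceCalculations list1 list2 list3 task)

-- ===== LEMMAS AND PROOFS =====

-- the common place value: element of l at place j counted from the right (0 = least significant), 0 beyond l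
def pvPad (l : List Int) (j : Nat) : Int := if h : j < l.length then l[l.length - 1 - j] else 0

def pvT (l1 l2 l3 : List Int) (s : Int) (j : Nat) : Int :=
  pvPad l2 j + s * (pvPad l1 j + pvPad l3 j)

lemma pv_max3 (a b c : Int) : PySem.List.max? [a, b, c] (fun x => x) = some (max (max a b) c) := by
  simp only [PySem.List.max?, List.foldl]
  by_cases h1 : a < b <;> simp only [h1, if_true, if_false] <;>
    simp only [max_def] <;> split_ifs <;> (try rfl) <;> (congr 1; omega)

lemma pv_foldl_cons {α β : Type} (f : α → β) (l : List α) (acc : List β) :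
    l.foldl (fun r i => f i :: r) acc = (l.map f).reverse ++ acc := by
  induction l generalizing acc with
  | nil => rfl
  | cons x xs ih => simp [List.foldl, ih]

lemma pv_pyGetD_rev (l : List Int) (j : Nat) (hj : j < l.length) :
    PySem.List.pyGetD l ((l.length : Int) - 1 - (j : Int)) 0 = l[l.length - 1 - j] := by
  rw [PySem.List.pyGetD_eq_getElem l 0 (by omega) (by omega)]
  simp only [show ((l.length : Int) - 1 - (j : Int)).toNat = l.length - 1 - j from by omega]

set_option maxHeartbeats 2000000 in
lemma pv_A_eq (l1 l2 l3 : List Int) (task : String) :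
    solveListPlaceCalculations l1 l2 l3 task =
      ((List.range (max (max l1.length l2.length) l3.length)).map
        (pvT l1 l2 l3 (if task = "simplify term2" then -1 else 1))).reverse := by
  unfold solveListPlaceCalculations
  simp only [pysem, pv_max3, Option.getD_some]
  simp only [List.getD, List.getElem?_cons_zero, List.getElem?_cons_succ, Option.getD_some,
    List.length_cons, List.length_nil]
  have hmax : max (max (l1.length : Int) (l2.length : Int)) (l3.length : Int)
      = ((max (max l1.length l2.length) l3.length : Nat) : Int) := by push_cast; rfl
  simp only [hmax]
  set L : Nat := max (max l1.length l2.length) l3.length with hL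
  simp only [PySem.List.pyRange_zero_nat L]
  rw [List.foldl_map, pv_foldl_cons, List.append_nil]
  congr 1
  apply List.map_congr_left
  intro k hk
  rw [List.mem_range] at hk
  have e1 : ((l1.length : Int) ≤ (L : Int) ∧ (l1.length : Int) > (k : Int)) ↔ k < l1.length := by
    omega
  have e2 : ((l2.length : Int) ≤ (L : Int) ∧ (l2.length : Int) > (k : Int)) ↔ k < l2.length := by
    omega
  have e3 : ((l3.length : Int) ≤ (L : Int) ∧ (l3.length : Int) > (k : Int)) ↔ k < l3.length := by
    omega
  rw [show ((0 + 1 + 1 + 1 : Nat) : Int) = 3 by norm_num]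
  rw [show PySem.List.pyRange 0 (3 : Int) = [0, 1, 2] from by decide]
  simp only [List.filter, pysem]
  simp only [List.getD, List.getElem?_cons_zero, List.getElem?_cons_succ, Option.getD_some]
  simp only [e1, e2, e3]
  by_cases h1 : k < l1.length <;> by_cases h2 : k < l2.length <;> by_cases h3 : k < l3.length <;>
    by_cases ht : task = "simplify term2" <;>
    simp only [pysem, h1, h2, h3, ht, decide_true, decide_false, if_true, if_false, List.foldl] <;>
    simp [pvT, pvPad, h1, h2, h3, pv_pyGetD_rev] <;> try ring

lemma pv_pass_spec (lst : List Int) (sign start off : Int) (res : List Int)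
    (hnn : 0 ≤ off + start) (hub : off + start + lst.length ≤ res.length) :
    (PySem.List.enumerate lst start).foldl (fun r q =>
      PySem.List.pySetD r (off + q.1) (PySem.List.pyGetD r (off + q.1) 0 + sign * q.2)) res
    = List.ofFn (n := res.length) (fun i =>
        res[i] + sign * (if off + start ≤ (i : Int) ∧ (i : Int) < off + start + lst.length
                         then PySem.List.pyGetD lst ((i : Int) - off - start) 0 else 0)) := by
  induction lst generalizing start res with
  | nil =>
    simp only [PySem.List.enumerate_nil, List.foldl_nil, List.length_nil]
    apply List.ext_getElem
    · simp
    · intro i hi hi2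
      simp
  | cons x xs ih =>
    rw [PySem.List.enumerate_cons, List.foldl_cons]
    simp only [List.length_cons] at hub
    have hlt : off + start < (res.length : Int) := by omega
    rw [PySem.List.pySetD_of_nonneg _ _ hnn,
        PySem.List.pyGetD_eq_getElem res 0 hnn hlt]
    rw [ih (start + 1) _ (by omega) (by simp only [List.length_set]; omega)]
    apply List.ext_getElem
    · simp
    · intro i hi hi2
      simp only [List.length_set] at hi
      rw [List.getElem_ofFn, List.getElem_ofFn]
      simp only [Fin.getElem_fin]
      rw [List.getElem_set]
      by_cases hceq : (off + start).toNat = i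
      · rw [if_pos hceq]
        subst hceq
        have hnot : ¬ (off + (start + 1) ≤ (((off + start).toNat : Nat) : Int) ∧
            (((off + start).toNat : Nat) : Int) < off + (start + 1) + (xs.length : Int)) := by omega
        have hcond : off + start ≤ (((off + start).toNat : Nat) : Int) ∧
            (((off + start).toNat : Nat) : Int) < off + start + ((x :: xs).length : Int) := by
          simp only [List.length_cons]; push_cast; omega
        rw [if_neg hnot, if_pos hcond]
        have h0 : (((off + start).toNat : Nat) : Int) - off - start = 0 := by omega
        rw [h0, PySem.List.pyGetD_zero_cons]
        ring
      · rw [if_neg hceq]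
        by_cases hin : off + (start + 1) ≤ (i : Int) ∧ (i : Int) < off + (start + 1) + (xs.length : Int)
        · have hin' : off + start ≤ (i : Int) ∧ (i : Int) < off + start + ((x :: xs).length : Int) := by
            simp only [List.length_cons]; push_cast; omega
          rw [if_pos hin, if_pos hin']
          have e1 : PySem.List.pyGetD (x :: xs) ((i : Int) - off - start) 0
              = (x :: xs).getD ((i : Int) - off - start).toNat 0 :=
            PySem.List.pyGetD_of_nonneg _ _ (by omega)
          have e2 : PySem.List.pyGetD xs ((i : Int) - off - (start + 1)) 0
              = xs.getD ((i : Int) - off - (start + 1)).toNat 0 :=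
            PySem.List.pyGetD_of_nonneg _ _ (by omega)
          have hk : ((i : Int) - off - start).toNat = (((i : Int) - off - (start + 1)).toNat) + 1 := by
            omega
          rw [e1, e2, hk, List.getD_cons_succ]
        · have hin' : ¬ (off + start ≤ (i : Int) ∧ (i : Int) < off + start + ((x :: xs).length : Int)) := by
            simp only [List.length_cons] at *; push_cast at hin ⊢; omega
          rw [if_neg hin, if_neg hin']

lemma pv_entry (l : List Int) (L i : Nat) (hi : i < L) (hl : l.length ≤ L) :
    (if (L : Int) - l.length + 0 ≤ (i : Int) ∧ (i : Int) < (L : Int) - l.length + 0 + l.length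
     then PySem.List.pyGetD l ((i : Int) - ((L : Int) - l.length) - 0) 0 else 0)
    = pvPad l (L - 1 - i) := by
  unfold pvPad
  by_cases hb : L - l.length ≤ i
  · have h2 : L - 1 - i < l.length := by omega
    rw [if_pos (by omega), dif_pos h2]
    rw [PySem.List.pyGetD_eq_getElem l 0 (by omega) (by omega)]
    have hidx : ((i : Int) - ((L : Int) - l.length) - 0).toNat = l.length - 1 - (L - 1 - i) := by
      omega
    simp only [hidx]
  · have h2 : ¬ (L - 1 - i < l.length) := by omega
    rw [if_neg (by omega), dif_neg h2]

lemma pv_pass_len (lst : List Int) (sign start off : Int) (res : List Int)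
    (hnn : 0 ≤ off + start) (hub : off + start + lst.length ≤ res.length) :
    ((PySem.List.enumerate lst start).foldl (fun r q =>
      PySem.List.pySetD r (off + q.1) (PySem.List.pyGetD r (off + q.1) 0 + sign * q.2)) res).length
    = res.length := by
  rw [pv_pass_spec lst sign start off res hnn hub, List.length_ofFn]

lemma pv_pass_getD (lst : List Int) (sign start off : Int) (res : List Int)
    (hnn : 0 ≤ off + start) (hub : off + start + lst.length ≤ res.length)
    (i : Nat) (hi : i < res.length) :
    ((PySem.List.enumerate lst start).foldl (fun r q =>
      PySem.List.pySetD r (off + q.1) (PySem.List.pyGetD r (off + q.1) 0 + sign * q.2)) res).getD i 0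
    = res.getD i 0 + sign * (if off + start ≤ (i : Int) ∧ (i : Int) < off + start + lst.length
                             then PySem.List.pyGetD lst ((i : Int) - off - start) 0 else 0) := by
  rw [pv_pass_spec lst sign start off res hnn hub]
  rw [List.getD_eq_getElem _ _ (by simpa using hi), List.getElem_ofFn]
  simp only [Fin.getElem_fin]
  rw [List.getD_eq_getElem _ _ hi]

lemma pv_B_eq (l1 l2 l3 : List Int) (task : String) :
    solveListPlaceCalculations_alt l1 l2 l3 task =
      ((List.range (max (max l1.length l2.length) l3.length)).map
        (pvT l1 l2 l3 (if task = "simplify term2" then -1 else 1))).reverse := by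
  unfold solveListPlaceCalculations_alt
  set s : Int := if task = "simplify term2" then -1 else 1 with hs
  set L : Nat := max (max l1.length l2.length) l3.length with hL
  have hmax : max (max (l1.length : Int) (l2.length : Int)) (l3.length : Int) = (L : Int) := by
    simp only [hL]; push_cast; rfl
  simp only [hmax, List.foldl_cons, List.foldl_nil, Int.toNat_natCast]
  set R0 : List Int := List.replicate L 0 with hR0
  set P1 : List Int := (PySem.List.enumerate l1).foldl (fun r q =>
    PySem.List.pySetD r ((L : Int) - l1.length + q.1)
      (PySem.List.pyGetD r ((L : Int) - l1.length + q.1) 0 + s * q.2)) R0 with hP1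
  set P2 : List Int := (PySem.List.enumerate l2).foldl (fun r q =>
    PySem.List.pySetD r ((L : Int) - l2.length + q.1)
      (PySem.List.pyGetD r ((L : Int) - l2.length + q.1) 0 + 1 * q.2)) P1 with hP2
  set P3 : List Int := (PySem.List.enumerate l3).foldl (fun r q =>
    PySem.List.pySetD r ((L : Int) - l3.length + q.1)
      (PySem.List.pyGetD r ((L : Int) - l3.length + q.1) 0 + s * q.2)) P2 with hP3
  have h0 : R0.length = L := by simp [hR0]
  have hnn1 : (0 : Int) ≤ (L : Int) - l1.length + 0 := by omega
  have hnn2 : (0 : Int) ≤ (L : Int) - l2.length + 0 := by omega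
  have hnn3 : (0 : Int) ≤ (L : Int) - l3.length + 0 := by omega
  have hub1 : (L : Int) - l1.length + 0 + l1.length ≤ R0.length := by rw [h0]; omega
  have hlen1 : P1.length = R0.length := pv_pass_len l1 s 0 _ R0 hnn1 hub1
  have hub2 : (L : Int) - l2.length + 0 + l2.length ≤ P1.length := by rw [hlen1, h0]; omega
  have hlen2 : P2.length = P1.length := pv_pass_len l2 1 0 _ P1 hnn2 hub2
  have hub3 : (L : Int) - l3.length + 0 + l3.length ≤ P2.length := by rw [hlen2, hlen1, h0]; omega
  have hlen3 : P3.length = P2.length := pv_pass_len l3 s 0 _ P2 hnn3 hub3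
  apply List.ext_getElem
  · simp only [hlen3, hlen2, hlen1, h0, List.length_reverse, List.length_map, List.length_range]
  · intro i hi hi2
    have hiL : i < L := by rw [hlen3, hlen2, hlen1, h0] at hi; exact hi
    have e3 := pv_pass_getD l3 s 0 _ P2 hnn3 hub3 i (by rw [hlen2, hlen1, h0]; exact hiL)
    have e2 := pv_pass_getD l2 1 0 _ P1 hnn2 hub2 i (by rw [hlen1, h0]; exact hiL)
    have e1 := pv_pass_getD l1 s 0 _ R0 hnn1 hub1 i (by rw [h0]; exact hiL)
    rw [show P3[i] = P3.getD i 0 from (List.getD_eq_getElem _ _ hi).symm]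
    rw [← hP3] at e3
    rw [e3, e2, e1]
    rw [List.getElem_reverse, List.getElem_map, List.getElem_range]
    have g1 := pv_entry l1 L i hiL (by omega)
    have g2 := pv_entry l2 L i hiL (by omega)
    have g3 := pv_entry l3 L i hiL (by omega)
    simp only [List.length_map, List.length_range] at hi2 ⊢
    rw [g1, g2, g3]
    rw [hR0, List.getD_replicate]
    unfold pvT
    ring
    exact hiL

theorem solveListPlaceCalculations_spec : Claim_equal_solveListPlaceCalculations := by
  intro l1 l2 l3 task _
  unfold Spec_solveListPlaceCalculations
  rw [pv_A_eq, pv_B_eq]
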